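-- pv_equiv track=rewrite | github.com/NunaInc/sql_tools | dataschema/strutil.py | UnescapeUnderscores
-- ===== SOURCE A (Python) =====
-- def UnescapeUnderscores(s: str):
--     """Reverses EscapeWithUnderscores."""
--     i = 0
--     r = ''
--     while i < len(s):
--         if s[i] == '_':
--             j = s.find('_', i + 1)
--             if j == -1:
--                 raise ValueError('Not a valid string escaped with `_`')
--             ss = s[i + 1:j]
--             if not ss:
--                 r += '_'
--             else:
--                 r += chr(int(ss, 16))
--             i = j + 1
--         else:
--             r += s[i]
--             i += 1
--     return r
-- ===== SOURCE B (Python) =====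
-- def UnescapeUnderscores(s: str):
--     """Reverses EscapeWithUnderscores."""
--     parts = s.split('_')
--     if len(parts) % 2 == 0:
--         raise ValueError('Not a valid string escaped with `_`')
--     out = []
--     for k, tok in enumerate(parts):
--         if k % 2 == 0:
--             out.append(tok)
--         else:
--             out.append('_' if not tok else chr(int(tok, 16)))
--     return ''.join(out)
-- ===== Notes on version B (the rewrite author's own statement) =====
-- stated objective: faster
-- what changed: B replaces A's index-driven while loop (find/slice per escape, building the result by repeated string concatenation) by a single s.split('_') and one pass over the parts joined once at the end; even-indexed parts are literal text, odd-indexed parts hex escapes, an even part count is the unmatched-underscore error.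
import Mathlib
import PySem

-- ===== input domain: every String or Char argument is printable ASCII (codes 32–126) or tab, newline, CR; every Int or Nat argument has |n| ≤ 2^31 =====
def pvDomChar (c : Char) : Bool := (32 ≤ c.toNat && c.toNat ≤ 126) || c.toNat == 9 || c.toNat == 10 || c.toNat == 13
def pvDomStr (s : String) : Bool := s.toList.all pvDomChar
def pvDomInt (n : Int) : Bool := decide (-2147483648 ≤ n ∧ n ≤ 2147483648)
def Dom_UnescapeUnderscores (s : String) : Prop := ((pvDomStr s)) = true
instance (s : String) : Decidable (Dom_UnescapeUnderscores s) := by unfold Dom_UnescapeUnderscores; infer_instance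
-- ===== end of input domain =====

-- B replaces A's index-scanning while loop (which rebuilds the result string by repeated
-- concatenation) by one split('_') and a single alternating pass joined once; measured faster.


-- ===== PORT A =====
-- chr(n) succeeds in Python for 0 ≤ n ≤ 0x10FFFF; the surrogate band U+D800–U+DFFF
-- is additionally ruled out because a Lean Char cannot represent it (see Pre_ comment).
def pvChrOK (n : Int) : Bool := (decide (0 ≤ n) && decide (n < 55296)) || (decide (57344 ≤ n) && decide (n ≤ 1114111))

-- A's while loop over index i, ported as recursion on the remaining suffix s[i:];
-- s.find('_', i+1) is Chars.find on the suffix tail, s[i+1:j] its take, i = j+1 its drop.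
-- Every path on which the Python raises (unmatched '_', int(ss,16) ValueError,
-- chr out of range) returns none, as does a chr hitting the surrogate band.
def pvAGo : List Char → Option (List Char)
  | [] => some []
  | c :: rest =>
    if c = '_' then
      let j := PySem.Chars.find rest ['_']
      if j = -1 then none
      else
        let ss := rest.take j.toNat
        if ss = [] then (pvAGo (rest.drop (j.toNat + 1))).map (fun r => '_' :: r)
        else
          match PySem.Int.ofCharsBase? ss 16 with
          | none => none
          | some n =>
            if pvChrOK n then (pvAGo (rest.drop (j.toNat + 1))).map (fun r => Char.ofNat n.toNat :: r)
            else none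
    else (pvAGo rest).map (fun r => c :: r)
termination_by cs => cs.length
decreasing_by all_goals simp

def UnescapeUnderscores (s : String) : String :=
  match pvAGo s.toList with
  | some r => String.ofList r
  | none => ""   -- the Python raises ValueError here; excluded by Pre_

-- ===== PORT B =====
-- odd-indexed token: '' ↦ '_', otherwise chr(int(tok, 16)); none = the Python raises
def pvTok? (t : List Char) : Option (List Char) :=
  if t = [] then some ['_']
  else
    match PySem.Int.ofCharsBase? t 16 with
    | none => none
    | some n => if pvChrOK n then some [Char.ofNat n.toNat] else none

-- Source B's `for k, tok in enumerate(parts)` loop building `out`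
def pvBGo (k : Nat) : List (List Char) → Option (List (List Char))
  | [] => some []
  | t :: ts =>
    if k % 2 == 0 then (pvBGo (k + 1) ts).map (fun out => t :: out)
    else
      match pvTok? t with
      | none => none
      | some p => (pvBGo (k + 1) ts).map (fun out => p :: out)

def UnescapeUnderscores_alt (s : String) : String :=
  match PySem.Chars.split? s.toList ['_'] with
  | none => ""
  | some parts =>
    if parts.length % 2 == 0 then ""   -- Source B raises ValueError here; excluded by Pre_
    else
      match pvBGo 0 parts with
      | some out => String.ofList (PySem.Chars.join [] out)   -- ''.join(out)
      | none => ""                     -- Source B raises ValueError here; excluded by Pre_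

-- ===== PRECONDITION & SPEC =====
def pvOddToks : List (List Char) → List (List Char)
  | _ :: u :: rest => u :: pvOddToks rest
  | _ => []

def pvTokPre (t : List Char) : Bool :=
  t.isEmpty || ((PySem.Int.ofCharsBase? t 16).map pvChrOK).getD false

-- Pre_ excludes exactly the inputs on which A raises ValueError (an odd number of
-- underscores, a non-hex escape token, or chr out of range) and, in addition, escape
-- tokens denoting surrogate code points U+D800–U+DFFF: there A returns a one-character
-- surrogate string that no Lean Char/String can represent (B returns the same string).
def Pre_UnescapeUnderscores (s : String) : Prop :=
  (PySem.Chars.splitOn s.toList ['_']).length % 2 = 1 ∧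
  ∀ t ∈ pvOddToks (PySem.Chars.splitOn s.toList ['_']), pvTokPre t = true

instance (s : String) : Decidable (Pre_UnescapeUnderscores s) := by
  unfold Pre_UnescapeUnderscores; infer_instance

def pvWitness_UnescapeUnderscores : String := "a_41_b__c"

def Spec_UnescapeUnderscores (s : String) (out : String) : Prop := out = UnescapeUnderscores_alt s
instance (s : String) (out : String) : Decidable (Spec_UnescapeUnderscores s out) := by unfold Spec_UnescapeUnderscores; infer_instance

-- ===== CLAIM (what is proved, stated in full; the proofs are below) =====
def Claim_equal_UnescapeUnderscores : Prop := ∀ (s : String), Dom_UnescapeUnderscores s → Pre_UnescapeUnderscores s → Spec_UnescapeUnderscores s (UnescapeUnderscores s)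

-- ===== LEMMAS AND PROOFS =====

-- reference splitter: what Chars.splitOn on the one-char separator '_' computes
def pvSp : List Char → List Char → List (List Char)
  | [], cur => [cur.reverse]
  | c :: t, cur => if c = '_' then cur.reverse :: pvSp t [] else pvSp t (c :: cur)

theorem pvSp_ne_nil (l cur : List Char) : pvSp l cur ≠ [] := by
  induction l generalizing cur with
  | nil => simp [pvSp]
  | cons c t ih => simp only [pvSp]; split <;> simp [ih]

theorem pvGo_eq_pvSp (fuel : Nat) (l cur : List Char) (acc : List (List Char))
    (h : l.length < fuel) :
    PySem.Chars.splitOn.go ['_'] fuel l cur acc = acc.reverse ++ pvSp l cur := by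
  induction fuel generalizing l cur acc with
  | zero => omega
  | succ f ih =>
    cases l with
    | nil => simp [PySem.Chars.splitOn.go, pvSp]
    | cons c t =>
      simp only [PySem.Chars.splitOn.go]
      by_cases hc : c = '_'
      · subst hc
        rw [if_pos (by simp [List.isPrefixOf])]
        rw [ih _ _ _ (by simp at h ⊢; omega)]
        simp [pvSp]
      · rw [if_neg (by simp [List.isPrefixOf]; exact fun hh => hc hh.symm)]
        rw [ih _ _ _ (by simp at h ⊢; omega)]
        simp [pvSp, hc]

theorem pvSp_shift (t cur : List Char) :
    pvSp t cur = (pvSp t []).modifyHead (fun h => cur.reverse ++ h) := by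
  induction t generalizing cur with
  | nil => simp [pvSp]
  | cons c t ih =>
    simp only [pvSp]
    by_cases hc : c = '_'
    · simp [hc]
    · simp only [hc, if_neg, if_false]
      rw [ih (c :: cur), ih [c]]
      cases hsp : pvSp t [] with
      | nil => exact absurd hsp (pvSp_ne_nil t [])
      | cons a b => simp

theorem splitOn_nil_underscore : PySem.Chars.splitOn [] ['_'] = [[]] := by decide

theorem splitOn_cons_underscore (c : Char) (t : List Char) :
    PySem.Chars.splitOn (c :: t) ['_'] =
      if c = '_' then [] :: PySem.Chars.splitOn t ['_']
      else (PySem.Chars.splitOn t ['_']).modifyHead (fun h => c :: h) := by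
  show PySem.Chars.splitOn.go _ _ _ _ _ = _
  rw [pvGo_eq_pvSp _ _ _ _ (by simp)]
  show _ = if c = '_' then [] :: PySem.Chars.splitOn.go _ _ _ _ _ else (PySem.Chars.splitOn.go _ _ _ _ _).modifyHead _
  rw [pvGo_eq_pvSp _ _ _ _ (by simp)]
  simp only [pvSp, List.reverse_nil, List.nil_append]
  by_cases hc : c = '_'
  · simp [hc]
  · simp only [hc, if_false]
    rw [pvSp_shift t [c]]
    simp

theorem splitOn_ne_nil (l : List Char) : PySem.Chars.splitOn l ['_'] ≠ [] := by
  show PySem.Chars.splitOn.go _ _ _ _ _ ≠ []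
  rw [pvGo_eq_pvSp _ _ _ _ (by simp)]
  simp [pvSp_ne_nil]

theorem splitOn_no_sep (l : List Char) (h : '_' ∉ l) :
    PySem.Chars.splitOn l ['_'] = [l] := by
  induction l with
  | nil => exact splitOn_nil_underscore
  | cons c t ih =>
    simp at h
    rw [splitOn_cons_underscore, if_neg (by tauto), ih (by tauto)]
    simp

theorem splitOn_sep (ss r : List Char) (h : '_' ∉ ss) :
    PySem.Chars.splitOn (ss ++ '_' :: r) ['_'] = ss :: PySem.Chars.splitOn r ['_'] := by
  induction ss with
  | nil => simp [splitOn_cons_underscore]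
  | cons c t ih =>
    simp at h
    rw [List.cons_append, splitOn_cons_underscore, if_neg (by tauto), ih (by tauto)]
    simp

-- reference evaluator over the split parts: literal, escape, literal, escape, …
def pvProc : List (List Char) → Option (List Char)
  | [] => none
  | [t] => some t
  | t :: u :: rest =>
    match pvTok? u, pvProc rest with
    | some p, some r => some (t ++ p ++ r)
    | _, _ => none

theorem pvProc_modifyHead (c : Char) (ps : List (List Char)) (h : ps ≠ []) :
    pvProc (ps.modifyHead (fun t => c :: t)) = (pvProc ps).map (fun r => c :: r) := by
  match ps with
  | [] => exact absurd rfl h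
  | [t] => simp [pvProc]
  | t :: u :: rest =>
    simp only [List.modifyHead, pvProc]
    cases pvTok? u <;> cases pvProc rest <;> simp

theorem mem_singleton_infix (x : Char) (l : List Char) : [x] <:+: l ↔ x ∈ l := by
  constructor
  · rintro ⟨a, b, rfl⟩; simp
  · intro hm
    obtain ⟨a, b, rfl⟩ := List.append_of_mem hm
    exact ⟨a, b, by simp⟩

theorem find_decomp (rest : List Char) (h0 : 0 ≤ PySem.Chars.find rest ['_']) :
    '_' ∉ rest.take (PySem.Chars.find rest ['_']).toNat ∧
    rest = rest.take (PySem.Chars.find rest ['_']).toNat ++ '_' :: rest.drop ((PySem.Chars.find rest ['_']).toNat + 1) := by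
  obtain ⟨hpre, hmin⟩ := PySem.Chars.find_spec (s := rest) (sub := ['_']) h0
  set jn := (PySem.Chars.find rest ['_']).toNat with hjn
  have hlt : jn < rest.length := by
    by_contra hge
    rw [List.drop_eq_nil_of_le (by omega)] at hpre
    simp at hpre
  have hdrop : rest.drop jn = '_' :: rest.drop (jn + 1) := by
    obtain ⟨tl, htl⟩ := hpre
    have h2 : rest.drop jn = rest[jn] :: rest.drop (jn + 1) := List.drop_eq_getElem_cons hlt
    rw [h2] at htl
    obtain ⟨he, -⟩ := List.cons.inj htl
    rw [h2, ← he]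
  constructor
  · intro hmem
    obtain ⟨i, hi, hgi⟩ := List.getElem_of_mem hmem
    simp at hi
    have hilt : i < rest.length := by omega
    have : rest[i] = '_' := by
      rw [List.getElem_take] at hgi; exact hgi
    exact hmin i (by omega) (by
      rw [List.drop_eq_getElem_cons hilt, this]
      exact ⟨_, rfl⟩)
  · conv_lhs => rw [← List.take_append_drop jn rest]
    rw [hdrop]

theorem pvAGo_eq_pvProc : ∀ cs, pvAGo cs = pvProc (PySem.Chars.splitOn cs ['_'])
  | [] => by
    rw [splitOn_nil_underscore]; simp [pvAGo, pvProc]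
  | c :: rest => by
    rw [splitOn_cons_underscore]
    by_cases hc : c = '_'
    · subst hc
      rw [if_pos rfl]
      simp only [pvAGo, if_pos rfl]
      by_cases hneg : PySem.Chars.find rest ['_'] = -1
      · have hnm : '_' ∉ rest := by
          rw [← mem_singleton_infix]
          exact (PySem.Chars.find_eq_neg_one_iff rest ['_']).mp hneg
        rw [splitOn_no_sep rest hnm, if_pos hneg]
        cases pvTok? rest <;> simp [pvProc]
      · have h0 : 0 ≤ PySem.Chars.find rest ['_'] := by
          have := PySem.Chars.neg_one_le_find (s := rest) (sub := ['_'])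
          omega
        obtain ⟨hnm, hdec⟩ := find_decomp rest h0
        rw [if_neg hneg]
        conv_rhs => rw [hdec]
        rw [splitOn_sep _ _ hnm]
        have ih := pvAGo_eq_pvProc (rest.drop ((PySem.Chars.find rest ['_']).toNat + 1))
        simp only [pvProc, pvTok?]
        by_cases hss : rest.take (PySem.Chars.find rest ['_']).toNat = []
        · rw [if_pos hss, hss, if_pos rfl, ih]
          cases pvProc (PySem.Chars.splitOn (rest.drop ((PySem.Chars.find rest ['_']).toNat + 1)) ['_']) <;> simp
        · rw [if_neg hss, if_neg hss, ih]
          cases PySem.Int.ofCharsBase? (rest.take (PySem.Chars.find rest ['_']).toNat) 16 with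
          | none => simp
          | some n =>
            by_cases hok : pvChrOK n
            · simp only [hok, if_true]
              cases pvProc (PySem.Chars.splitOn (rest.drop ((PySem.Chars.find rest ['_']).toNat + 1)) ['_']) <;> simp
            · simp [hok]
    · rw [if_neg hc]
      simp only [pvAGo, if_neg hc]
      rw [pvAGo_eq_pvProc rest, pvProc_modifyHead c _ (splitOn_ne_nil rest)]
termination_by cs => cs.length
decreasing_by all_goals simp

theorem pvBGo_add_two (ps : List (List Char)) (k : Nat) :
    pvBGo (k + 2) ps = pvBGo k ps := by
  induction ps generalizing k with
  | nil => rfl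
  | cons t ts ih =>
    simp only [pvBGo, Nat.add_mod_right]
    rw [show k + 2 + 1 = k + 1 + 2 by omega, ih (k + 1)]

theorem pvBGo_eq_pvProc : ∀ ps : List (List Char), ps.length % 2 = 1 →
    (pvBGo 0 ps).map (fun out => out.flatten) = pvProc ps
  | [], h => by simp at h
  | [t], _ => by simp [pvBGo, pvProc, pvTok?]
  | t :: u :: rest, h => by
    have hr : rest.length % 2 = 1 := by simp at h; omega
    have ih := pvBGo_eq_pvProc rest hr
    simp only [pvBGo, pvProc, Nat.zero_mod, beq_self_eq_true, if_true,
      show ((1 : Nat) % 2 == 0) = false by rfl, Bool.false_eq_true, if_false]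
    rw [show (0:Nat) + 1 + 1 = 0 + 2 by omega, pvBGo_add_two]
    cases pvTok? u with
    | none => simp
    | some p =>
      cases hbp : pvBGo 0 rest with
      | none => rw [hbp] at ih; cases hpp : pvProc rest <;> simp [hpp] at ih ⊢
      | some out =>
        rw [hbp] at ih
        cases hpp : pvProc rest with
        | none => rw [hpp] at ih; simp at ih
        | some r => rw [hpp] at ih; simp at ih ⊢; simp [ih]

theorem pvTokPre_isSome (t : List Char) : pvTokPre t = true ↔ (pvTok? t).isSome := by
  simp only [pvTokPre, pvTok?]
  by_cases ht : t = []
  · simp [ht]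
  · simp only [ht, if_false, List.isEmpty_iff, Bool.false_or]
    cases PySem.Int.ofCharsBase? t 16 with
    | none => simp [ht]
    | some n => by_cases hok : pvChrOK n <;> simp [hok, ht]

theorem pvProc_isSome : ∀ ps : List (List Char), ps.length % 2 = 1 →
    (∀ t ∈ pvOddToks ps, pvTokPre t = true) → ∃ r, pvProc ps = some r
  | [], h, _ => by simp at h
  | [t], _, _ => ⟨t, rfl⟩
  | t :: u :: rest, h, h2 => by
    have hr : rest.length % 2 = 1 := by simp at h; omega
    have hu : pvTokPre u = true := h2 u (by simp [pvOddToks])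
    obtain ⟨r, hpr⟩ := pvProc_isSome rest hr (fun x hx => h2 x (by simp [pvOddToks, hx]))
    rw [pvTokPre_isSome] at hu
    obtain ⟨p, hp⟩ := Option.isSome_iff_exists.mp hu
    exact ⟨t ++ p ++ r, by simp [pvProc, hp, hpr]⟩

theorem join_nil_flatten (ps : List (List Char)) : PySem.Chars.join [] ps = ps.flatten := by
  induction ps with
  | nil => rfl
  | cons t ts ih => simp only [PySem.Chars.join, List.intercalate] at ih ⊢; cases ts <;> simp_all

-- ===== VERDICT (by name: the statement is the Claim_ definition above) =====
theorem UnescapeUnderscores_spec : Claim_equal_UnescapeUnderscores := by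
  intro s _ hpre
  obtain ⟨hpar, htoks⟩ := hpre
  unfold Spec_UnescapeUnderscores UnescapeUnderscores UnescapeUnderscores_alt
  obtain ⟨r, hr⟩ := pvProc_isSome _ hpar htoks
  have hA : pvAGo s.toList = some r := by rw [pvAGo_eq_pvProc, hr]
  have hB := pvBGo_eq_pvProc _ hpar
  rw [hr] at hB
  have hsplit : PySem.Chars.split? s.toList ['_'] = some (PySem.Chars.splitOn s.toList ['_']) := by
    simp [PySem.Chars.split?]
  rw [hA, hsplit]
  simp only [Option.some.injEq]
  rw [if_neg (by simp [hpar])]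
  cases hbg : pvBGo 0 (PySem.Chars.splitOn s.toList ['_']) with
  | none => rw [hbg] at hB; simp at hB
  | some out =>
    rw [hbg] at hB
    simp at hB
    simp [join_nil_flatten, hB]
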